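-- pv_equiv track=rewrite | github.com/vectimus/vectimus | src/vectimus/engine/normaliser.py | _detect_file_read
-- ===== SOURCE A (Python) =====
-- _FILE_READ_COMMANDS = frozenset(
--     {
--         # Unix/macOS
--         "cat",
--         "less",
--         "more",
--         "head",
--         "tail",
--         "strings",
--         "xxd",
--         "od",
--         "hexdump",
--         "bat",
--         "nl",
--         "tac",
--         "rev",
--         # Windows cmd
--         "type",
--         # Windows PowerShell (case-insensitive matching handled by _first_binary_lower)
--         "get-content",
--         "gc",
--     }
-- )
--
-- _GREP_LIKE_COMMANDS = frozenset(
--     {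
--         # Unix
--         "grep",
--         "egrep",
--         "fgrep",
--         # Windows cmd
--         "findstr",
--         # Windows PowerShell
--         "select-string",
--     }
-- )
--
-- def _extract_last_non_flag_arg(args_str: str) -> str | None:
--     """Return the last token in *args_str* that does not start with ``-``.
--
--     Handles simple quoting (double and single quotes) but not escapes.
--     """
--     tokens: list[str] = []
--     i = 0
--     while i < len(args_str):
--         ch = args_str[i]
--         if ch in " \t":
--             i += 1
--             continue
--         if ch in ("'", '"'):
--             end = args_str.find(ch, i + 1)
--             if end == -1:
--                 tokens.append(args_str[i + 1 :])
--                 break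
--             tokens.append(args_str[i + 1 : end])
--             i = end + 1
--         else:
--             end = i
--             while end < len(args_str) and args_str[end] not in " \t":
--                 end += 1
--             tokens.append(args_str[i:end])
--             i = end
--     # Return the last token that is not a flag.
--     for tok in reversed(tokens):
--         if not tok.startswith("-"):
--             return tok
--     return None
--
-- def _detect_file_read(stripped: str, first_word: str) -> str | None:
--     """Detect file read commands and return the target path."""
--     if first_word in _FILE_READ_COMMANDS:
--         # Extract file argument: last non-flag argument.
--         args = stripped.split(None, 1)
--         if len(args) > 1:
--             return _extract_last_non_flag_arg(args[1])
--
--     if first_word in _GREP_LIKE_COMMANDS: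
--         # grep [flags] pattern file — file is the last non-flag arg, but only
--         # if there are at least 2 non-flag args (pattern + file).
--         args = stripped.split(None, 1)
--         if len(args) > 1:
--             tokens = []
--             for tok in args[1].split():
--                 if not tok.startswith("-"):
--                     tokens.append(tok)
--             # Need at least 2: pattern and file.
--             if len(tokens) >= 2:
--                 return tokens[-1]
--
--     return None
-- ===== SOURCE B (Python) =====
-- _FILE_READ_COMMANDS = frozenset(
--     {"cat", "less", "more", "head", "tail", "strings", "xxd", "od", "hexdump",
--      "bat", "nl", "tac", "rev", "type", "get-content", "gc"}
-- )
--
-- _GREP_LIKE_COMMANDS = frozenset(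
--     {"grep", "egrep", "fgrep", "findstr", "select-string"}
-- )
--
--
-- def _last_non_flag(s: str) -> str | None:
--     """Last non-flag token of *s*, via a one-pass character state machine.
--
--     Keeps only the most recent non-flag token instead of building a token
--     list and scanning it backwards.  States: 0 = between tokens, 1 = inside
--     an unquoted token, 2 = inside a quoted token (quote char in ``q``).
--     """
--     last = None
--     mode = 0
--     q = ""
--     buf = ""
--     for ch in s:
--         if mode == 0:
--             if ch in " \t":
--                 pass
--             elif ch in "'\"":
--                 mode, q, buf = 2, ch, ""
--             else:
--                 mode, buf = 1, ch
--         elif mode == 1: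
--             if ch in " \t":
--                 if not buf.startswith("-"):
--                     last = buf
--                 mode = 0
--             else:
--                 buf += ch
--         else:
--             if ch == q:
--                 if not buf.startswith("-"):
--                     last = buf
--                 mode = 0
--             else:
--                 buf += ch
--     if mode != 0 and not buf.startswith("-"):
--         last = buf
--     return last
--
--
-- def _detect_file_read(stripped: str, first_word: str) -> str | None:
--     """Detect file read commands and return the target path."""
--     parts = stripped.split(None, 1)
--     if len(parts) < 2:
--         return None
--     rest = parts[1]
--     if first_word in _FILE_READ_COMMANDS:
--         return _last_non_flag(rest)
--     if first_word in _GREP_LIKE_COMMANDS: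
--         hits = [t for t in rest.split() if not t.startswith("-")]
--         if len(hits) >= 2:
--             return hits[-1]
--     return None
-- ===== Notes on version B (the rewrite author's own statement) =====
-- stated objective: alternative
-- what changed: The index-walking tokenizer that builds a full token list and then scans it backwards for the last non-flag token is replaced by a single left-to-right character state machine that keeps only the most recent non-flag token (no token list, no reverse scan); the grep branch keeps only a comprehension.
import Mathlib
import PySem

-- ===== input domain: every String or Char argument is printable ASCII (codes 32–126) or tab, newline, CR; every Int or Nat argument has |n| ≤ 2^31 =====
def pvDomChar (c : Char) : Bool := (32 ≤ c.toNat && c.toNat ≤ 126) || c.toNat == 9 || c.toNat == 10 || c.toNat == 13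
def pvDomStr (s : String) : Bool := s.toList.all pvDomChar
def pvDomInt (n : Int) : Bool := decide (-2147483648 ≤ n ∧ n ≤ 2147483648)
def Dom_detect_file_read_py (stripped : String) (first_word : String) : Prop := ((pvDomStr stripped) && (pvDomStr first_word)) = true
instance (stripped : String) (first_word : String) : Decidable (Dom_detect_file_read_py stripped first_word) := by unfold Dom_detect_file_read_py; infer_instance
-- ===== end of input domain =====

-- B replaces A's index-walking tokenizer + backwards scan of the token list by a one-pass
-- character state machine that keeps only the most recent non-flag token (objective: alternative).

-- Shared constants (Python's frozensets of command names) and the shared stdlib calls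
-- (str.split(None, 1), str.split(), str.startswith('-')) used by both Pythons.
def pvFileReadCmds : List String :=
  ["cat", "less", "more", "head", "tail", "strings", "xxd", "od", "hexdump",
   "bat", "nl", "tac", "rev", "type", "get-content", "gc"]

def pvGrepCmds : List String := ["grep", "egrep", "fgrep", "findstr", "select-string"]

-- "args_str[end] not in \" \\t\"" (token character, i.e. not a space/tab separator)
def pvNotSep (x : Char) : Bool := !(x = ' ' || x = '\t')

-- tok.startswith("-")
def pvFlag (t : List Char) : Bool := PySem.Chars.startswith t ['-']

-- ===== PORT A =====

-- A's while-loop tokenizer: skip space/tab; a quote scans for the matching quote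
-- (Python's args_str.find(ch, i+1) is cs.idxOf c on the remainder; find == -1 is c ∉ cs,
-- and an unterminated quote takes the whole remainder and BREAKS); otherwise an unquoted
-- token runs to the next space/tab.
def pvTokensA : List Char → List (List Char)
  | [] => []
  | c :: cs =>
    if c = ' ' ∨ c = '\t' then pvTokensA cs
    else if c = '\'' ∨ c = '"' then
      if c ∈ cs then (cs.take (cs.idxOf c)) :: pvTokensA (cs.drop (cs.idxOf c + 1))
      else [cs]
    else
      (c :: cs.takeWhile pvNotSep) ::
        pvTokensA (cs.dropWhile pvNotSep)
  termination_by s => s.length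
  decreasing_by
    all_goals simp
    all_goals (have := List.length_dropWhile_le pvNotSep cs; omega)

-- _extract_last_non_flag_arg: first token of reversed(tokens) not starting with '-'
def pvExtractA (s : List Char) : Option (List Char) :=
  (pvTokensA s).reverse.find? (fun t => !pvFlag t)

def detect_file_read_py (stripped : String) (first_word : String) : Option String :=
  (if pvFileReadCmds.contains first_word then
     match PySem.Chars.split₀Max stripped.toList 1 with
     | _ :: rest :: _ => some ((pvExtractA rest).map String.mk)   -- early `return`
     | _ => none
   else none).getD
  (if pvGrepCmds.contains first_word then
     match PySem.Chars.split₀Max stripped.toList 1 with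
     | _ :: rest :: _ =>
       let toks := (PySem.Chars.split₀ rest).foldl
         (fun acc tok => if !pvFlag tok then acc ++ [tok] else acc) []
       if toks.length ≥ 2 then (PySem.List.pyGet? toks (-1)).map String.mk else none
     | _ => none
   else none)

-- ===== PORT B =====

-- Source B's state machine step: state = (last, mode, q, buf); mode 0 = between tokens,
-- 1 = inside an unquoted token, 2 = inside a quoted token.
def pvStepB (st : Option (List Char) × Nat × Char × List Char) (ch : Char) :
    Option (List Char) × Nat × Char × List Char :=
  let (last, mode, q, buf) := st
  if mode = 0 then
    if ch = ' ' ∨ ch = '\t' then st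
    else if ch = '\'' ∨ ch = '"' then (last, 2, ch, [])
    else (last, 1, q, [ch])
  else if mode = 1 then
    if ch = ' ' ∨ ch = '\t' then ((if PySem.Chars.startswith buf ['-'] then last else some buf), 0, q, buf)
    else (last, mode, q, buf ++ [ch])
  else
    if ch = q then ((if PySem.Chars.startswith buf ['-'] then last else some buf), 0, q, buf)
    else (last, mode, q, buf ++ [ch])

def pvLastNonFlagB (s : List Char) : Option (List Char) :=
  let (last, mode, _, buf) := s.foldl pvStepB (none, 0, ' ', [])
  if mode ≠ 0 ∧ PySem.Chars.startswith buf ['-'] = false then some buf else last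

def detect_file_read_py_alt (stripped : String) (first_word : String) : Option String :=
  match PySem.Chars.split₀Max stripped.toList 1 with
  | [] => none
  | [_] => none
  | _ :: rest :: _ =>
    if (["cat", "less", "more", "head", "tail", "strings", "xxd", "od", "hexdump", "bat", "nl", "tac", "rev", "type", "get-content", "gc"] : List String).contains first_word then (pvLastNonFlagB rest).map String.mk
    else if (["grep", "egrep", "fgrep", "findstr", "select-string"] : List String).contains first_word then
      let hits := (PySem.Chars.split₀ rest).filter (fun t => !PySem.Chars.startswith t ['-'])
      if hits.length ≥ 2 then (PySem.List.pyGet? hits (-1)).map String.mk else none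
    else none

-- ===== PRECONDITION & SPEC =====
def Spec_detect_file_read_py (stripped : String) (first_word : String) (out : Option String) : Prop := out = detect_file_read_py_alt stripped first_word
instance (stripped : String) (first_word : String) (out : Option String) : Decidable (Spec_detect_file_read_py stripped first_word out) := by unfold Spec_detect_file_read_py; infer_instance

-- ===== CLAIM (what is proved, stated in full; the proofs are below) =====
def Claim_equal_detect_file_read_py : Prop := ∀ (stripped : String) (first_word : String), Dom_detect_file_read_py stripped first_word → Spec_detect_file_read_py stripped first_word (detect_file_read_py stripped first_word)

-- ===== LEMMAS AND PROOFS =====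

-- "update last if the token is not a flag"
def pvEmit (last : Option (List Char)) (t : List Char) : Option (List Char) :=
  if pvFlag t then last else some t

-- the end-of-string flush of Source B's loop, as a function of the final state
def pvFinish (st : Option (List Char) × Nat × Char × List Char) : Option (List Char) :=
  if st.2.1 ≠ 0 ∧ pvFlag st.2.2.2 = false then some st.2.2.2 else st.1

lemma pvLastNonFlagB_eq (s : List Char) :
    pvLastNonFlagB s = pvFinish (s.foldl pvStepB (none, 0, ' ', [])) := by
  unfold pvLastNonFlagB pvFinish
  rcases s.foldl pvStepB (none, 0, ' ', []) with ⟨last, mode, q, buf⟩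
  rfl

lemma pvEmit_eq_orElse (last : Option (List Char)) (t : List Char) :
    pvEmit last t = (if pvFlag t = false then some t else none).or last := by
  unfold pvEmit; by_cases h : pvFlag t <;> simp [h]

-- an in-word run consumes the unquoted token and (if a separator ends it) that separator
-- an in-word run consumes the unquoted token and (if a separator ends it) that separator
lemma pvWordRun (s : List Char) : ∀ (last : Option (List Char)) (q : Char) (buf : List Char),
    pvFinish (s.foldl pvStepB (last, 1, q, buf)) =
    pvFinish ((s.dropWhile pvNotSep).foldl pvStepB
      (pvEmit last (buf ++ s.takeWhile pvNotSep), 0, q,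
        buf ++ s.takeWhile pvNotSep)) := by
  induction s with
  | nil =>
    intro last q buf
    by_cases hf : pvFlag buf <;> simp [pvFinish, pvEmit, hf]
  | cons c cs ih =>
    intro last q buf
    by_cases hc : c = ' ' ∨ c = '\t'
    · have hb : pvNotSep c = false := by rcases hc with h | h <;> simp [pvNotSep, h]
      have h1 : pvStepB (last, 1, q, buf) c = (pvEmit last buf, 0, q, buf) := by
        simp [pvStepB, hc, pvEmit, pvFlag]
      have h2 : pvStepB (pvEmit last buf, 0, q, buf) c = (pvEmit last buf, 0, q, buf) := by
        simp [pvStepB, hc]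
      simp only [List.takeWhile_cons, List.dropWhile_cons, hb, Bool.false_eq_true, if_false,
        List.foldl_cons, h1, h2, List.append_nil]
    · have hnc := not_or.mp hc
      have hb : pvNotSep c = true := by simp [pvNotSep, hnc.1, hnc.2]
      have h1 : pvStepB (last, 1, q, buf) c = (last, 1, q, buf ++ [c]) := by
        simp [pvStepB, hc]
      simp only [List.takeWhile_cons, List.dropWhile_cons, hb, if_true, List.foldl_cons, h1]
      rw [ih last q (buf ++ [c])]
      simp

-- an in-quote run consumes up to and including the matching quote, or the whole remainder
lemma pvQuoteRun (s : List Char) : ∀ (last : Option (List Char)) (q : Char) (buf : List Char),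
    pvFinish (s.foldl pvStepB (last, 2, q, buf)) =
    if q ∈ s then
      pvFinish ((s.drop (s.idxOf q + 1)).foldl pvStepB
        (pvEmit last (buf ++ s.take (s.idxOf q)), 0, q, buf ++ s.take (s.idxOf q)))
    else pvEmit last (buf ++ s) := by
  induction s with
  | nil =>
    intro last q buf
    by_cases hf : pvFlag buf <;> simp [pvFinish, pvEmit, hf]
  | cons c cs ih =>
    intro last q buf
    by_cases hc : c = q
    · subst hc
      have h1 : pvStepB (last, 2, c, buf) c = (pvEmit last buf, 0, c, buf) := by
        simp [pvStepB, pvEmit, pvFlag]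
      simp only [List.mem_cons, true_or, if_pos, List.idxOf_cons_self, List.foldl_cons, h1]
      simp
    · have hidx : (c :: cs).idxOf q = cs.idxOf q + 1 := by
        simp only [List.idxOf_cons, Bool.cond_eq_ite, beq_iff_eq]
        rw [if_neg hc]
      have hmem : q ∈ c :: cs ↔ q ∈ cs := by simp [Ne.symm hc]
      have h1 : pvStepB (last, 2, q, buf) c = (last, 2, q, buf ++ [c]) := by
        simp [pvStepB, hc]
      simp only [List.foldl_cons, h1]
      rw [ih last q (buf ++ [c])]
      by_cases hq : q ∈ cs
      · rw [if_pos hq, if_pos (hmem.mpr hq), hidx]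
        simp
      · rw [if_neg hq, if_neg (fun h => hq (hmem.mp h))]
        simp

-- the DFA from the between-tokens state computes A's backwards scan of A's token list
lemma pvMain (s : List Char) : ∀ (last : Option (List Char)) (q : Char) (buf : List Char),
    pvFinish (s.foldl pvStepB (last, 0, q, buf)) =
    ((pvTokensA s).reverse.find? (fun t => !pvFlag t)).or last := by
  induction s using pvTokensA.induct with
  | case1 => intro last q buf; simp [pvFinish, pvTokensA]
  | case2 c cs hc ih =>
    intro last q buf
    rw [pvTokensA]
    have h1 : pvStepB (last, 0, q, buf) c = (last, 0, q, buf) := by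
      simp [pvStepB, hc]
    rw [if_pos hc, List.foldl_cons, h1, ih last q buf]
  | case3 c cs hc hq hmem ih =>
    intro last q buf
    rw [pvTokensA]
    have h1 : pvStepB (last, 0, q, buf) c = (last, 2, c, []) := by
      simp [pvStepB, hc, hq]
    rw [if_neg hc, if_pos hq, if_pos hmem, List.foldl_cons, h1, pvQuoteRun, if_pos hmem]
    simp only [List.nil_append]
    rw [ih (pvEmit last (cs.take (cs.idxOf c))) c (cs.take (cs.idxOf c))]
    rw [List.reverse_cons, List.find?_append, pvEmit_eq_orElse]
    simp [Option.or_assoc]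
  | case4 c cs hc hq hmem =>
    intro last q buf
    rw [pvTokensA]
    have h1 : pvStepB (last, 0, q, buf) c = (last, 2, c, []) := by
      simp [pvStepB, hc, hq]
    rw [if_neg hc, if_pos hq, if_neg hmem, List.foldl_cons, h1, pvQuoteRun, if_neg hmem,
      pvEmit_eq_orElse]
    simp
  | case5 c cs hc hq ih =>
    intro last q buf
    rw [pvTokensA]
    have h1 : pvStepB (last, 0, q, buf) c = (last, 1, q, [c]) := by
      simp [pvStepB, hc, hq]
    rw [if_neg hc, if_neg hq, List.foldl_cons, h1, pvWordRun]
    simp only [List.cons_append, List.nil_append]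
    rw [ih]
    rw [List.reverse_cons, List.find?_append, pvEmit_eq_orElse]
    simp [Option.or_assoc]

-- B's state machine equals A's extract-last-non-flag
lemma pvExtract_eq (s : List Char) : pvExtractA s = pvLastNonFlagB s := by
  rw [pvLastNonFlagB_eq, pvMain s none ' ' []]
  simp [pvExtractA]

-- ===== VERDICT (by name: the statement is the Claim_ definition above) =====
theorem detect_file_read_py_spec : Claim_equal_detect_file_read_py := by
  intro stripped first_word _
  unfold Spec_detect_file_read_py detect_file_read_py detect_file_read_py_alt
  have hfold : ∀ (l : List (List Char)),
      List.foldl (fun acc tok => if PySem.Chars.startswith tok ['-'] = false then acc ++ [tok] else acc)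
        ([] : List (List Char)) l = List.filter (fun t => !PySem.Chars.startswith t ['-']) l := by
    intro l
    simpa using PySem.List.foldl_append_if (fun t => !PySem.Chars.startswith t ['-']) id l []
  have e1 : ((["cat", "less", "more", "head", "tail", "strings", "xxd", "od", "hexdump", "bat",
      "nl", "tac", "rev", "type", "get-content", "gc"] : List String).contains first_word)
      = pvFileReadCmds.contains first_word := rfl
  have e2 : ((["grep", "egrep", "fgrep", "findstr", "select-string"] : List String).contains
      first_word) = pvGrepCmds.contains first_word := rfl
  have e3 : pvExtractA = pvLastNonFlagB := funext pvExtract_eq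
  rcases h : PySem.Chars.split₀Max stripped.toList 1 with _ | ⟨a, _ | ⟨rest, tl⟩⟩ <;>
    simp only [e1, e2] <;>
    by_cases hfr : first_word ∈ pvFileReadCmds <;>
    by_cases hgr : first_word ∈ pvGrepCmds <;>
    simp [hfr, hgr, ← e3, pvExtractA, pvFlag, hfold]
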